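-- pv_equiv track=rewrite | github.com/instances-generator/OLA | instance_generator.py | add_operation_patient_identity
-- ===== SOURCE A (Python) =====
-- def add_operation_patient_identity(num_operations):
--     '''[O][P] - We keep it simple, identity matrix.'''
--     num_patients = num_operations
--     matrix = []
--     for i in range(num_patients):
--         row = []
--         for j in range(num_patients):
--             if i == j:
--                 row.append(1)
--             else:
--                 row.append(0)
--         matrix.append(row)
--     return "K = " + str(matrix) + "; \n"
-- ===== SOURCE B (Python) =====
-- def add_operation_patient_identity(num_operations):
--     '''Identity matrix string; each row built positionally (zero-fill + one placed), no inner loop/branch.'''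
--     matrix = [[0] * i + [1] + [0] * (num_operations - i - 1)
--               for i in range(num_operations)]
--     return "K = " + str(matrix) + "; \n"
-- ===== Notes on version B (the rewrite author's own statement) =====
-- stated objective: simpler
-- what changed: Each row is built positionally as [0]*i + [1] + [0]*(n-i-1) inside a single comprehension, removing A's inner column loop and its i==j branch.
import Mathlib
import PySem

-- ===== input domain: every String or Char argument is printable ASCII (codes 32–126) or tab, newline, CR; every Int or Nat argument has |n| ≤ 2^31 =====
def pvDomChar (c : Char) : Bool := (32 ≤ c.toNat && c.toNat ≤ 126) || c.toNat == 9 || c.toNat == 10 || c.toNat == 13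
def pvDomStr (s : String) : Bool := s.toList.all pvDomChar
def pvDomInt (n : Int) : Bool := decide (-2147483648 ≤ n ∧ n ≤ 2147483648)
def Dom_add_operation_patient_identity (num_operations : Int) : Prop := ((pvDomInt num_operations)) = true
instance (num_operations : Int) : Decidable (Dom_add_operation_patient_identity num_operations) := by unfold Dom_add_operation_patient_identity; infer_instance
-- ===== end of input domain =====

-- B builds each identity row positionally (zero-fill + one placed) instead of A's inner column loop with an i==j branch; simpler.


-- shared renderer: str(matrix) for a list of lists of ints, exactly CPython's repr
def pvRenderRow (row : List Int) : String :=
  "[" ++ PySem.Str.join ", " (row.map PySem.Int.toStr) ++ "]"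

def pvRenderMatrix (m : List (List Int)) : String :=
  "[" ++ PySem.Str.join ", " (m.map pvRenderRow) ++ "]"

-- ===== PORT A =====
def add_operation_patient_identity (num_operations : Int) : String :=
  let num_patients := num_operations
  let matrix := (PySem.List.pyRange 0 num_patients 1).foldl (fun matrix i =>
      let row := (PySem.List.pyRange 0 num_patients 1).foldl (fun row j =>
          if i == j then row ++ [(1 : Int)] else row ++ [(0 : Int)]) []
      matrix ++ [row]) []
  "K = " ++ pvRenderMatrix matrix ++ "; \n"

-- ===== PORT B =====
def add_operation_patient_identity_alt (num_operations : Int) : String :=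
  let matrix := (PySem.List.pyRange 0 num_operations 1).map (fun i =>
      List.replicate i.toNat (0 : Int) ++ [(1 : Int)] ++
      List.replicate (num_operations - i - 1).toNat (0 : Int))
  "K = " ++ pvRenderMatrix matrix ++ "; \n"

-- ===== PRECONDITION & SPEC =====
def Spec_add_operation_patient_identity (num_operations : Int) (out : String) : Prop := out = add_operation_patient_identity_alt num_operations
instance (num_operations : Int) (out : String) : Decidable (Spec_add_operation_patient_identity num_operations out) := by unfold Spec_add_operation_patient_identity; infer_instance

-- ===== CLAIM (what is proved, stated in full; the proofs are below) =====
def Claim_equal_add_operation_patient_identity : Prop := ∀ (num_operations : Int), Dom_add_operation_patient_identity num_operations → Spec_add_operation_patient_identity num_operations (add_operation_patient_identity num_operations)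

-- ===== LEMMAS AND PROOFS =====

-- A's inner loop over j produces exactly B's positionally-built row, for any i in range
lemma pv_row_eq (n i : Int) (hi0 : 0 ≤ i) (hin : i < n) :
    (PySem.List.pyRange 0 n 1).foldl (fun row j =>
        if i == j then row ++ [(1 : Int)] else row ++ [(0 : Int)]) [] =
    List.replicate i.toNat (0 : Int) ++ [(1 : Int)] ++
      List.replicate (n - i - 1).toNat (0 : Int) := by
  have hsplit : PySem.List.pyRange 0 n 1 =
      PySem.List.pyRange 0 i 1 ++ PySem.List.pyRange i n 1 :=
    PySem.List.pyRange_one_append 0 i n hi0 (le_of_lt hin)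
  have hcons : PySem.List.pyRange i n 1 = i :: PySem.List.pyRange (i + 1) n 1 :=
    PySem.List.pyRange_one_cons hin
  have hstep : (fun (row : List Int) (j : Int) =>
      if i == j then row ++ [(1 : Int)] else row ++ [(0 : Int)]) =
      fun row j => row ++ [if i == j then (1 : Int) else (0 : Int)] := by
    funext row j; by_cases h : i = j <;> simp [h]
  rw [hsplit, hcons, List.foldl_append, hstep]
  simp only [PySem.List.foldl_append_singleton_eq_map, List.map_cons, List.nil_append]
  have h1 : (PySem.List.pyRange 0 i 1).map
      (fun j => if i == j then (1 : Int) else (0 : Int)) =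
      List.replicate i.toNat (0 : Int) := by
    rw [List.eq_replicate_iff]
    constructor
    · simp [PySem.List.length_pyRange_one]
    · intro b hb
      obtain ⟨j, hj, rfl⟩ := List.mem_map.mp hb
      have := PySem.List.mem_pyRange_one.mp hj
      have : i ≠ j := by omega
      simp [this]
  have h2 : (PySem.List.pyRange (i + 1) n 1).map
      (fun j => if i == j then (1 : Int) else (0 : Int)) =
      List.replicate (n - i - 1).toNat (0 : Int) := by
    rw [List.eq_replicate_iff]
    constructor
    · simp [PySem.List.length_pyRange_one]; omega
    · intro b hb
      obtain ⟨j, hj, rfl⟩ := List.mem_map.mp hb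
      have := PySem.List.mem_pyRange_one.mp hj
      have : i ≠ j := by omega
      simp [this]
  have h3 : (n - i - 1).toNat = (n - i).toNat - 1 := by omega
  simp only [beq_iff_eq] at h1 h2 ⊢
  simp [h1, h2, h3]

-- A's outer loop builds the map B builds
lemma pv_matrix_eq (n : Int) :
    (PySem.List.pyRange 0 n 1).foldl (fun matrix i =>
        matrix ++ [(PySem.List.pyRange 0 n 1).foldl (fun row j =>
          if i == j then row ++ [(1 : Int)] else row ++ [(0 : Int)]) []]) [] =
    (PySem.List.pyRange 0 n 1).map (fun i =>
        List.replicate i.toNat (0 : Int) ++ [(1 : Int)] ++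
        List.replicate (n - i - 1).toNat (0 : Int)) := by
  rw [PySem.List.foldl_append_singleton_eq_map]
  apply List.map_congr_left
  intro i hi
  have := PySem.List.mem_pyRange_one.mp hi
  exact pv_row_eq n i this.1 this.2

-- ===== VERDICT (by name: the statement is the Claim_ definition above) =====
theorem add_operation_patient_identity_spec : Claim_equal_add_operation_patient_identity := by
  intro n _
  unfold Spec_add_operation_patient_identity add_operation_patient_identity
    add_operation_patient_identity_alt
  simp only [pv_matrix_eq]
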